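-- pv_equiv track=rewrite | github.com/zmcui/camTools | scripts/cppv3makeup/smutcParse.py | format_cpptcBlockRegs_t
-- ===== SOURCE A (Python) =====
-- def format_cpptcBlockRegs_t(blockList):
--     strBuf = ''
--     for frame in sorted({item[0] for item in blockList}):
--         for layer in sorted({item[1] for item in blockList}):
--             strBuf += "static cpptcBlockRegs_t f%sl%sBlockArr[] = {\n"%(frame, layer)
--             for frameNum, layerNum, tileNum, sliceNum in [b for b in blockList if b[1] == layer]:
--                 strBuf += "\tARRAYED_ITEM(f%sl%st%ss%sRegBufArr),\n"%(frameNum, layerNum, tileNum, sliceNum)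
--             strBuf += "};\n\n"
--
--     return strBuf
-- ===== SOURCE B (Python) =====
-- def format_cpptcBlockRegs_t(blockList):
--     # Group the per-block entry lines by layer once, then assemble per frame/layer.
--     bodies = {}
--     for f, l, t, s in blockList:
--         bodies[l] = bodies.get(l, []) + ["\tARRAYED_ITEM(f%sl%st%ss%sRegBufArr),\n" % (f, l, t, s)]
--     frames = sorted({b[0] for b in blockList})
--     layers = sorted(bodies)
--     parts = []
--     for frame in frames:
--         for layer in layers:
--             parts.append("static cpptcBlockRegs_t f%sl%sBlockArr[] = {\n" % (frame, layer))
--             parts.extend(bodies[layer])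
--             parts.append("};\n\n")
--     return ''.join(parts)
-- ===== Notes on version B (the rewrite author's own statement) =====
-- stated objective: faster
-- what changed: B groups the entry lines by layer in one pass over blockList into a dict and assembles the output from list parts joined once, instead of A's rescan of the whole blockList for every frame/layer pair with repeated string concatenation.
import Mathlib
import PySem

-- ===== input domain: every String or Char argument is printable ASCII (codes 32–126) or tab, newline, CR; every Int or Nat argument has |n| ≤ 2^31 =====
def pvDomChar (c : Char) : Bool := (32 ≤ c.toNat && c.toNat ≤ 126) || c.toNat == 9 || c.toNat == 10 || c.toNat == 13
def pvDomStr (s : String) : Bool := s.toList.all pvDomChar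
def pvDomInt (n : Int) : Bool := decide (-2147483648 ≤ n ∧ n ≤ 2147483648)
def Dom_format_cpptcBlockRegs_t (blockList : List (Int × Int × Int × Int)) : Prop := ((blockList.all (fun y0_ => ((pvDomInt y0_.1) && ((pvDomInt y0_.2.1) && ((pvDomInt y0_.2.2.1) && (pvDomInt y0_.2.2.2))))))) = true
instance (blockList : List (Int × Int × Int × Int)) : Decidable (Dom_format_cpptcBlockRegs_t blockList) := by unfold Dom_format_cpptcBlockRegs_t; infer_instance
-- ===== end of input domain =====

-- B groups the entry lines by layer in one dict pass and joins list parts once,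
-- instead of A's rescan of blockList for every frame/layer pair with repeated string concatenation.

-- ===== PORT A =====
def pvHeaderA (frame layer : Int) : String :=
  "static cpptcBlockRegs_t f" ++ PySem.Int.toStr frame ++ "l" ++ PySem.Int.toStr layer ++ "BlockArr[] = {\n"
def pvEntryA (b : Int × Int × Int × Int) : String :=
  "\tARRAYED_ITEM(f" ++ PySem.Int.toStr b.1 ++ "l" ++ PySem.Int.toStr b.2.1 ++ "t" ++ PySem.Int.toStr b.2.2.1 ++ "s" ++ PySem.Int.toStr b.2.2.2 ++ "RegBufArr),\n"

def format_cpptcBlockRegs_t (blockList : List (Int × Int × Int × Int)) : String :=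
  (PySem.List.sorted (PySem.Set.ofList (blockList.map (fun item => item.1))) (fun x => x) false).foldl
    (fun strBuf frame =>
      (PySem.List.sorted (PySem.Set.ofList (blockList.map (fun item => item.2.1))) (fun x => x) false).foldl
        (fun strBuf layer =>
          ((blockList.filter (fun b => b.2.1 == layer)).foldl
            (fun strBuf b => strBuf ++ pvEntryA b)
            (strBuf ++ pvHeaderA frame layer)) ++ "};\n\n")
        strBuf)
    ""

-- ===== PORT B =====
def pvHeaderB (frame layer : Int) : String :=
  "static cpptcBlockRegs_t f" ++ PySem.Int.toStr frame ++ "l" ++ PySem.Int.toStr layer ++ "BlockArr[] = {\n"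
def pvEntryB (b : Int × Int × Int × Int) : String :=
  "\tARRAYED_ITEM(f" ++ PySem.Int.toStr b.1 ++ "l" ++ PySem.Int.toStr b.2.1 ++ "t" ++ PySem.Int.toStr b.2.2.1 ++ "s" ++ PySem.Int.toStr b.2.2.2 ++ "RegBufArr),\n"

def format_cpptcBlockRegs_t_alt (blockList : List (Int × Int × Int × Int)) : String :=
  let bodies : PySem.Dict Int (List String) :=
    blockList.foldl (fun d b => d.modify b.2.1 [] (fun v => v ++ [pvEntryB b])) PySem.Dict.empty
  let frames := PySem.List.sorted (PySem.Set.ofList (blockList.map (fun b => b.1))) (fun x => x) false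
  let layers := PySem.List.sorted (PySem.Dict.keys bodies) (fun x => x) false
  let parts : List String :=
    frames.foldl (fun ps frame =>
      layers.foldl (fun ps layer =>
        ((ps ++ [pvHeaderB frame layer]) ++ bodies.getD layer []) ++ ["};\n\n"]) ps) []
  PySem.Str.join "" parts

-- ===== PRECONDITION & SPEC =====
def Spec_format_cpptcBlockRegs_t (blockList : List (Int × Int × Int × Int)) (out : String) : Prop := out = format_cpptcBlockRegs_t_alt blockList
instance (blockList : List (Int × Int × Int × Int)) (out : String) : Decidable (Spec_format_cpptcBlockRegs_t blockList out) := by unfold Spec_format_cpptcBlockRegs_t; infer_instance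

-- ===== CLAIM (what is proved, stated in full; the proofs are below) =====
def Claim_equal_format_cpptcBlockRegs_t : Prop := ∀ (blockList : List (Int × Int × Int × Int)), Dom_format_cpptcBlockRegs_t blockList → Spec_format_cpptcBlockRegs_t blockList (format_cpptcBlockRegs_t blockList)

-- ===== LEMMAS AND PROOFS =====

theorem pv_join_chars_cons (cs : List Char) (l : List (List Char)) :
    PySem.Chars.join [] (cs :: l) = cs ++ PySem.Chars.join [] l := by
  cases l with
  | nil => simp [PySem.Chars.join, List.intercalate]
  | cons b t => rw [PySem.Chars.join_cons_cons]; simp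

theorem pv_empty_toList : ("" : String).toList = [] := rfl

theorem pv_join_toList (l : List String) :
    (PySem.Str.join "" l).toList = (l.map String.toList).flatten := by
  induction l with
  | nil => rfl
  | cons x t ih =>
      simp only [PySem.Str.join, List.map_cons, pv_empty_toList, pv_join_chars_cons,
        String.toList_ofList, List.flatten_cons] at ih ⊢
      rw [ih]

-- a string-building foldl, seen on the character-list side
theorem pv_foldl_toList {α : Type} (l : List α) (g : String → α → String) (F : α → List Char)
    (h : ∀ s x, (g s x).toList = s.toList ++ F x) :
    ∀ s : String, (l.foldl g s).toList = s.toList ++ (l.map F).flatten := by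
  induction l with
  | nil => intro s; simp
  | cons x t ih => intro s; simp [List.foldl_cons, ih, h]

theorem pv_flatten_flatMap {α β : Type} (l : List α) (q : α → List (List β)) :
    (l.flatMap q).flatten = l.flatMap (fun x => (q x).flatten) := by
  induction l with
  | nil => rfl
  | cons x t ih => simp [List.flatMap_cons, List.flatten_append, ih]

-- chunk emitted for one (frame, layer) pair, as a character list
def pvChunk (blockList : List (Int × Int × Int × Int)) (frame layer : Int) : List Char :=
  (pvHeaderA frame layer).toList
  ++ ((blockList.filter (fun b => b.2.1 == layer)).map (fun b => (pvEntryA b).toList)).flatten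
  ++ ("};\n\n" : String).toList

theorem pvA_normal (blockList : List (Int × Int × Int × Int)) (frames layers : List Int) :
  (frames.foldl
    (fun strBuf frame =>
      layers.foldl
        (fun strBuf layer =>
          ((blockList.filter (fun b => b.2.1 == layer)).foldl
            (fun strBuf b => strBuf ++ pvEntryA b)
            (strBuf ++ pvHeaderA frame layer)) ++ "};\n\n")
        strBuf)
    "").toList
  = (frames.map (fun frame => (layers.map (pvChunk blockList frame)).flatten)).flatten := by
  have hmid : ∀ (frame : Int) (s : String),
      (layers.foldl
        (fun strBuf layer =>
          ((blockList.filter (fun b => b.2.1 == layer)).foldl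
            (fun strBuf b => strBuf ++ pvEntryA b)
            (strBuf ++ pvHeaderA frame layer)) ++ "};\n\n")
        s).toList = s.toList ++ (layers.map (pvChunk blockList frame)).flatten := by
    intro frame
    refine pv_foldl_toList layers _ (pvChunk blockList frame) ?_
    intro s' layer
    rw [String.toList_append]
    rw [pv_foldl_toList _ _ (fun b => (pvEntryA b).toList) (by intro u b; simp) (s' ++ pvHeaderA frame layer)]
    simp [pvChunk]
  rw [pv_foldl_toList frames _ (fun frame => (layers.map (pvChunk blockList frame)).flatten)
      (fun s frame => hmid frame s) ""]
  simp

theorem pv_getD (blockList : List (Int × Int × Int × Int)) (layer : Int) :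
    (blockList.foldl (fun d b => d.modify b.2.1 [] (fun v => v ++ [pvEntryB b])) PySem.Dict.empty).getD layer []
      = (blockList.filter (fun b => b.2.1 == layer)).map pvEntryB := by
  rw [show (blockList.foldl (fun d b => d.modify b.2.1 [] (fun v => v ++ [pvEntryB b])) PySem.Dict.empty)
      = ((blockList.map (fun b => (b.2.1, pvEntryB b))).foldl (fun d p => d.modify p.1 [] (fun v => v ++ [p.2])) PySem.Dict.empty)
    from by rw [List.foldl_map]]
  rw [PySem.Dict.getD_foldl_modify_append]
  simp [List.filter_map, Function.comp_def]

theorem pv_keys (blockList : List (Int × Int × Int × Int)) :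
    (blockList.foldl (fun d b => d.modify b.2.1 [] (fun v => v ++ [pvEntryB b])) PySem.Dict.empty).keys
      = PySem.Set.ofList (blockList.map (fun b => b.2.1)) := by
  rw [PySem.Dict.keys_foldl_modify_key]
  rfl

theorem pv_parts (frames layers : List Int) (bodies : PySem.Dict Int (List String)) :
    frames.foldl (fun ps frame =>
      layers.foldl (fun ps layer =>
        ((ps ++ [pvHeaderB frame layer]) ++ bodies.getD layer []) ++ ["};\n\n"]) ps) []
    = frames.flatMap (fun frame => layers.flatMap (fun layer =>
        [pvHeaderB frame layer] ++ bodies.getD layer [] ++ ["};\n\n"])) := by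
  have h1 : ∀ (frame : Int) (ps : List String),
      layers.foldl (fun ps layer =>
        ((ps ++ [pvHeaderB frame layer]) ++ bodies.getD layer []) ++ ["};\n\n"]) ps
      = ps ++ layers.flatMap (fun layer =>
        [pvHeaderB frame layer] ++ bodies.getD layer [] ++ ["};\n\n"]) := by
    intro frame ps
    rw [← PySem.List.foldl_append_eq_flatMap]
    apply PySem.List.foldl_congr_mem
    intro acc x _
    simp
  calc frames.foldl (fun ps frame =>
      layers.foldl (fun ps layer =>
        ((ps ++ [pvHeaderB frame layer]) ++ bodies.getD layer []) ++ ["};\n\n"]) ps) []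
      = frames.foldl (fun ps frame => ps ++ layers.flatMap (fun layer =>
          [pvHeaderB frame layer] ++ bodies.getD layer [] ++ ["};\n\n"])) [] := by
        apply PySem.List.foldl_congr_mem
        intro acc x _
        exact h1 x acc
    _ = _ := by rw [PySem.List.foldl_append_eq_flatMap]; rfl

theorem format_cpptcBlockRegs_t_spec : Claim_equal_format_cpptcBlockRegs_t := by
  intro blockList _
  unfold Spec_format_cpptcBlockRegs_t
  rw [← String.toList_inj]
  show (format_cpptcBlockRegs_t blockList).toList = (format_cpptcBlockRegs_t_alt blockList).toList
  rw [format_cpptcBlockRegs_t, format_cpptcBlockRegs_t_alt]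
  rw [pvA_normal]
  rw [pv_parts, pv_join_toList]
  simp only [pv_keys, pv_getD]
  rw [List.map_flatMap, pv_flatten_flatMap]
  simp only [List.map_flatMap, pv_flatten_flatMap]
  refine congrArg List.flatten (List.map_congr_left ?_)
  intro frame _
  refine congrArg List.flatten (List.map_congr_left ?_)
  intro layer _
  simp [pvChunk, pvHeaderA, pvHeaderB, pvEntryA, pvEntryB, Function.comp_def]
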